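-- pv_equiv track=rewrite | github.com/Dreamy-Jy/Coding-Challenge-Solutions | Professor-Chen/Compeleted/Least_Common_Ancestor.py | getLeastCommonAncestor
-- ===== SOURCE A (Python) =====
-- def getDepth(index):
--     """Returns the dept of an value in an heap, starting with 0"""
--     depth_end = 0
--     depth = 0
--
--     for i in range(index + 1):
--         if i > depth_end:
--             depth = depth + 1
--             depth_end += 2**depth
--     return depth
--
-- def getParentIndex(index):
--     """Returns a parent Index for a given node"""
--     if index == 0:
--         return 0
--
--     return int(index - (index // 2) - 1)
--
-- def getLeastCommonAncestor(index_a, index_b):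
--     """Given the two indexs of nodes in a heap, this method returns their least common ancestor"""
--     a_parent = getParentIndex(index_a)
--     b_parent = getParentIndex(index_b)
--
--     if a_parent == b_parent:
--         return a_parent
--
--     if a_parent == 0 or b_parent == 0:
--         return 0
--
--     if getDepth(a_parent) == getDepth(b_parent):
--         return getLeastCommonAncestor(a_parent, b_parent)
--     elif getDepth(a_parent) < getDepth(b_parent):
--         return getLeastCommonAncestor(index_a, b_parent)
--     elif getDepth(a_parent) > getDepth(b_parent):
--         return getLeastCommonAncestor(a_parent, index_b)
-- ===== SOURCE B (Python) =====
-- def getLeastCommonAncestor(index_a, index_b):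
--     """Given the two indexs of nodes in a heap, this method returns their least common ancestor"""
--     # parent of node i is (i - 1) // 2; the root (or any index <= 0) has parent 0
--     a = (index_a - 1) // 2 if index_a > 0 else 0
--     b = (index_b - 1) // 2 if index_b > 0 else 0
--     # climb the deeper node (the one with the larger index) until the chains meet
--     while a != b:
--         if a > b:
--             a = (a - 1) // 2
--         else:
--             b = (b - 1) // 2
--     return a
-- ===== Notes on version B (the rewrite author's own statement) =====
-- stated objective: faster
-- what changed: Replaces the recursion that recomputes each node's depth with an O(index)-time counting loop by a single iterative climb that repeatedly lifts the larger of the two parent indices, needing no depth computation at all.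
-- outside the precondition, e.g. on getLeastCommonAncestor(-5, -3): A returns -2, B returns 0; on getLeastCommonAncestor(-1, -2): A raises RecursionError, B returns 0
import Mathlib
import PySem

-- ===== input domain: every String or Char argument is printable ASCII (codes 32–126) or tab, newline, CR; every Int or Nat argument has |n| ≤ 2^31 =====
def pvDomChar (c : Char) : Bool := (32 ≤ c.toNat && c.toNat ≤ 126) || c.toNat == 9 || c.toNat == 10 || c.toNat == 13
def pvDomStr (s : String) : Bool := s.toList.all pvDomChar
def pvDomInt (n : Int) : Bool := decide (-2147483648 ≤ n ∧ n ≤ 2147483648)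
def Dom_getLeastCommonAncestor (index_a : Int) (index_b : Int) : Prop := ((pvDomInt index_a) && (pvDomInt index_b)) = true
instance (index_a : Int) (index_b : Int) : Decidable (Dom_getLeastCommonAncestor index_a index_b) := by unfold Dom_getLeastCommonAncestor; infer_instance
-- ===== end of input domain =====

-- B replaces A's depth-driven recursion (each step recomputing depths by an O(index) counting
-- loop) by a single iterative climb of the larger parent index; equality is proved on Pre_.

-- ===== PORT A =====
-- getDepth: the counting loop over range(index + 1); state = (depth_end, depth).
-- depth is always ≥ 0, so porting Python's 2**depth as 2 ^ (…).toNat is exact.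
def getDepth (index : Int) : Int :=
  ((PySem.List.pyRange 0 (index + 1)).foldl
    (fun (st : Int × Int) i =>
      if st.1 < i then (st.1 + 2 ^ (st.2 + 1).toNat, st.2 + 1) else st)
    ((0 : Int), (0 : Int))).2

def getParentIndex (index : Int) : Int :=
  if index = 0 then 0 else index - PySem.Int.floordiv index 2 - 1

-- A's recursion, with fuel (Python recurses unboundedly; on Pre_ the fuel below suffices,
-- which the proofs establish).  The final `else 0` is Python's fall-through `return None`,
-- unreachable by trichotomy of the depth comparisons.
def getLCAFuel : Nat → Int → Int → Int
  | 0, _, _ => 0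
  | fuel + 1, index_a, index_b =>
    let a_parent := getParentIndex index_a
    let b_parent := getParentIndex index_b
    if a_parent = b_parent then a_parent
    else if a_parent = 0 ∨ b_parent = 0 then 0
    else if getDepth a_parent = getDepth b_parent then getLCAFuel fuel a_parent b_parent
    else if getDepth a_parent < getDepth b_parent then getLCAFuel fuel index_a b_parent
    else if getDepth b_parent < getDepth a_parent then getLCAFuel fuel a_parent index_b
    else 0

def getLeastCommonAncestor (index_a : Int) (index_b : Int) : Int :=
  getLCAFuel (index_a.toNat + index_b.toNat + 1) index_a index_b

-- ===== PORT B =====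
-- the while-loop of Source B, with fuel (sufficient on Pre_, proved below)
def lcaClimb : Nat → Int → Int → Int
  | 0, a, _ => a
  | fuel + 1, a, b =>
    if a ≠ b then
      if a > b then lcaClimb fuel (PySem.Int.floordiv (a - 1) 2) b
      else lcaClimb fuel a (PySem.Int.floordiv (b - 1) 2)
    else a

def getLeastCommonAncestor_alt (index_a : Int) (index_b : Int) : Int :=
  let a := if 0 < index_a then PySem.Int.floordiv (index_a - 1) 2 else 0
  let b := if 0 < index_b then PySem.Int.floordiv (index_b - 1) 2 else 0
  lcaClimb (index_a.toNat + index_b.toNat + 1) a b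

-- ===== PRECONDITION & SPEC =====
-- Pre_ excludes pairs where BOTH indices are negative — not heap nodes: there A either hits
-- Python's recursion limit (RecursionError) or returns a negative "ancestor" (-1 or -2), an
-- artefact of its parent formula's negative fixpoints, while B returns the root 0.
def Pre_getLeastCommonAncestor (index_a : Int) (index_b : Int) : Prop :=
  0 ≤ index_a ∨ 0 ≤ index_b
instance (index_a : Int) (index_b : Int) : Decidable (Pre_getLeastCommonAncestor index_a index_b) := by
  unfold Pre_getLeastCommonAncestor; infer_instance

def pvWitness_getLeastCommonAncestor : Int × Int := (5, 9)

def Spec_getLeastCommonAncestor (index_a : Int) (index_b : Int) (out : Int) : Prop :=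
  out = getLeastCommonAncestor_alt index_a index_b
instance (index_a : Int) (index_b : Int) (out : Int) : Decidable (Spec_getLeastCommonAncestor index_a index_b out) := by
  unfold Spec_getLeastCommonAncestor; infer_instance

-- ===== CLAIM (what is proved, stated in full; the proofs are below) =====
def Claim_equal_getLeastCommonAncestor : Prop := ∀ (index_a : Int) (index_b : Int), Dom_getLeastCommonAncestor index_a index_b → Pre_getLeastCommonAncestor index_a index_b → Spec_getLeastCommonAncestor index_a index_b (getLeastCommonAncestor index_a index_b)

-- ===== LEMMAS AND PROOFS =====

-- parent on Nat: pn 0 = 0, pn (n+1) = n/2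
def pn (n : Nat) : Nat := (n - 1) / 2

-- reference climb: first common element of the two ancestor chains
def Lref (p q : Nat) : Nat :=
  if p = q then p
  else if q < p then Lref (pn p) q
  else Lref p (pn q)
termination_by p + q
decreasing_by
  · simp only [pn]; omega
  · simp only [pn]; omega

-- depth on Nat
def Dn (n : Nat) : Nat := Nat.log2 (n + 1)

lemma Dn_pow_bounds (n : Nat) : 2 ^ Dn n ≤ n + 1 ∧ n + 1 < 2 ^ (Dn n + 1) := by
  constructor
  · simpa [Dn, Nat.log2_eq_log_two] using Nat.pow_log_le_self 2 (x := n + 1) (by omega)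
  · simpa [Dn, Nat.log2_eq_log_two] using Nat.lt_pow_succ_log_self (b := 2) (by omega) (n + 1)

lemma Dn_mono {a b : Nat} (h : a ≤ b) : Dn a ≤ Dn b := by
  simp only [Dn, Nat.log2_eq_log_two]
  exact Nat.log_mono_right (by omega)

lemma lt_of_Dn_lt {a b : Nat} (h : Dn a < Dn b) : a < b := by
  by_contra hc
  exact absurd (Dn_mono (by omega : b ≤ a)) (by omega)

lemma Dn_pn {p : Nat} (hp : 1 ≤ p) : Dn (pn p) = Dn p - 1 := by
  have h1 : pn p + 1 = (p + 1) / 2 := by simp only [pn]; omega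
  simp only [Dn, h1, Nat.log2_eq_log_two]
  exact Nat.log_div_base 2 (p + 1)

lemma Dn_pos {p : Nat} (hp : 1 ≤ p) : 1 ≤ Dn p := by
  simp only [Dn, Nat.log2_eq_log_two]
  exact ((Nat.le_log_iff_pow_le (by omega) (by omega)).2 (by simpa using hp)).trans_eq rfl

lemma pn_lt {p : Nat} (hp : 1 ≤ p) : pn p < p := by simp only [pn]; omega

lemma Lref_self (p : Nat) : Lref p p = p := by rw [Lref]; simp

lemma Lref_zero_left (q : Nat) : Lref 0 q = 0 := by
  induction q using Nat.strong_induction_on with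
  | _ q ih =>
    rw [Lref]
    rcases Nat.eq_zero_or_pos q with h | h
    · simp [h]
    · rw [if_neg (by omega), if_neg (by omega)]
      exact ih (pn q) (pn_lt h)

lemma Lref_zero_right (p : Nat) : Lref p 0 = 0 := by
  induction p using Nat.strong_induction_on with
  | _ p ih =>
    rw [Lref]
    rcases Nat.eq_zero_or_pos p with h | h
    · simp [h]
    · rw [if_neg (by omega), if_pos (by omega)]
      exact ih (pn p) (pn_lt h)

-- equal depths: A climbs both at once, the climb does it in two steps
lemma Lref_step_eq {p q : Nat} (hp : 1 ≤ p) (hq : 1 ≤ q) (hne : p ≠ q)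
    (hd : Dn p = Dn q) : Lref p q = Lref (pn p) (pn q) := by
  rcases Nat.lt_or_ge q p with h | h
  · rw [Lref, if_neg hne, if_pos h]
    have hlt : pn p < q := lt_of_Dn_lt (by have := Dn_pos hp; rw [Dn_pn hp]; omega)
    rw [Lref, if_neg (by omega), if_neg (by omega)]
  · have h' : p < q := by omega
    rw [Lref, if_neg hne, if_neg (by omega)]
    have hlt : pn q < p := lt_of_Dn_lt (by have := Dn_pos hq; rw [Dn_pn hq]; omega)
    rw [Lref, if_neg (by omega), if_pos (by omega)]

lemma Lref_step_lt {p q : Nat} (hd : Dn p < Dn q) : Lref p q = Lref p (pn q) := by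
  have h : p < q := lt_of_Dn_lt hd
  rw [Lref, if_neg (by omega), if_neg (by omega)]

lemma Lref_step_gt {p q : Nat} (hd : Dn q < Dn p) : Lref p q = Lref (pn p) q := by
  have h : q < p := lt_of_Dn_lt hd
  rw [Lref, if_neg (by omega), if_pos h]

-- the depth loop computes Dn
lemma depthLoop_spec (n : Nat) :
    (PySem.List.pyRange 0 ((n : Int) + 1)).foldl
      (fun (st : Int × Int) i =>
        if st.1 < i then (st.1 + 2 ^ (st.2 + 1).toNat, st.2 + 1) else st)
      ((0 : Int), (0 : Int))
    = ((2 ^ (Dn n + 1) - 2 : Int), (Dn n : Int)) := by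
  induction n with
  | zero => decide
  | succ n ih =>
    rw [show (((n + 1 : Nat) : Int)) + 1 = ((n : Int) + 1) + 1 by push_cast; ring,
        PySem.List.pyRange_one_succ_right (by positivity), List.foldl_append, ih]
    obtain ⟨hlo, hhi⟩ := Dn_pow_bounds n
    obtain ⟨hlo', hhi'⟩ := Dn_pow_bounds (n + 1)
    simp only [List.foldl_cons, List.foldl_nil]
    by_cases hcond : ((2 : Int) ^ (Dn n + 1) - 2 < (n : Int) + 1)
    · -- n + 2 = 2 ^ (Dn n + 1), depth increases
      have h2 : (n : Int) + 2 ≥ ((2 ^ (Dn n + 1) : Nat) : Int) := by push_cast; omega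
      have h2' : n + 2 = 2 ^ (Dn n + 1) := by
        have := Nat.one_le_two_pow (n := Dn n + 1)
        omega
      have hD : Dn (n + 1) = Dn n + 1 := by
        simp only [Dn, Nat.log2_eq_log_two] at *
        exact Nat.log_eq_of_pow_le_of_lt_pow (by omega)
          (by rw [pow_succ]; omega)
      rw [if_pos hcond]
      have ht : ((Dn n : Int) + 1).toNat = Dn n + 1 := by omega
      simp only [hD, ht]
      rw [Prod.mk.injEq]
      refine ⟨by ring, by norm_num⟩
    · have h2' : n + 2 < 2 ^ (Dn n + 1) := by
        have : ¬ ((2 : Int) ^ (Dn n + 1) - 2 < (n : Int) + 1) := hcond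
        have hc : ((2 ^ (Dn n + 1) : Nat) : Int) = (2 : Int) ^ (Dn n + 1) := by push_cast; ring
        omega
      have hD : Dn (n + 1) = Dn n := by
        simp only [Dn, Nat.log2_eq_log_two] at *
        exact Nat.log_eq_of_pow_le_of_lt_pow (by omega) (by omega)
      rw [if_neg hcond]
      simp [hD]

lemma getDepth_cast (n : Nat) : getDepth (n : Int) = (Dn n : Int) := by
  rw [getDepth, depthLoop_spec]

lemma getDepth_neg {i : Int} (h : i < 0) : getDepth i = 0 := by
  rw [getDepth, PySem.List.pyRange_one]
  rw [show (i + 1 - 0).toNat = 0 by omega]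
  simp

lemma getParentIndex_cast (n : Nat) : getParentIndex (n : Int) = (pn n : Int) := by
  rw [getParentIndex]
  rcases Nat.eq_zero_or_pos n with h | h
  · simp [h, pn]
  · rw [if_neg (by exact_mod_cast (by omega : (n : Nat) ≠ 0))]
    have := PySem.Int.floordiv_natCast n 2
    rw [show ((2 : Nat) : Int) = (2 : Int) by norm_num] at this
    rw [this]
    simp only [pn]
    omega

lemma getParentIndex_neg {x : Int} (h : x < 0) : getParentIndex x < 0 := by
  rw [getParentIndex, if_neg (by omega)]
  have hm0 := PySem.Int.mod_nonneg x (b := 2) (by omega)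
  have hm1 := PySem.Int.mod_lt x (b := 2) (by omega)
  have heq := PySem.Int.floordiv_mul_add_mod x 2
  omega

lemma floordiv_pred_cast {n : Nat} (h : 1 ≤ n) :
    PySem.Int.floordiv ((n : Int) - 1) 2 = (pn n : Int) := by
  rw [show ((n : Int) - 1) = (((n - 1 : Nat)) : Int) by omega]
  have := PySem.Int.floordiv_natCast (n - 1) 2
  rw [show ((2 : Nat) : Int) = (2 : Int) by norm_num] at this
  rw [this]; rfl

-- A on two nonnegative indices computes Lref of the two parents
lemma A_nonneg : ∀ (fuel : Nat) (a b : Nat), a + b + 1 ≤ fuel →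
    getLCAFuel fuel (a : Int) (b : Int) = (Lref (pn a) (pn b) : Int) := by
  intro fuel
  induction fuel with
  | zero => intro a b h; omega
  | succ f ih =>
    intro a b hfuel
    rw [getLCAFuel]
    simp only [getParentIndex_cast]
    by_cases heq : ((pn a : Int) = (pn b : Int))
    · rw [if_pos heq]
      have : pn a = pn b := by exact_mod_cast heq
      rw [this, Lref_self]
    · rw [if_neg heq]
      have hne : pn a ≠ pn b := fun h => heq (by exact_mod_cast h)
      by_cases hz : ((pn a : Int) = 0 ∨ (pn b : Int) = 0)
      · rw [if_pos hz]
        rcases hz with h | h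
        · rw [show pn a = 0 by exact_mod_cast h, Lref_zero_left]; simp
        · rw [show pn b = 0 by exact_mod_cast h, Lref_zero_right]; simp
      · rw [if_neg hz]
        rw [not_or] at hz
        have hpa : 1 ≤ pn a := by
          rcases Nat.eq_zero_or_pos (pn a) with h | h
          · exact absurd (by exact_mod_cast h : ((pn a : Int) = 0)) hz.1
          · omega
        have hpb : 1 ≤ pn b := by
          rcases Nat.eq_zero_or_pos (pn b) with h | h
          · exact absurd (by exact_mod_cast h : ((pn b : Int) = 0)) hz.2
          · omega
        have ha1 : 1 ≤ a := by by_contra h; simp [show a = 0 by omega, pn] at hpa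
        have hb1 : 1 ≤ b := by by_contra h; simp [show b = 0 by omega, pn] at hpb
        simp only [getDepth_cast]
        by_cases hd : ((Dn (pn a) : Int) = (Dn (pn b) : Int))
        · rw [if_pos hd]
          have hdn : Dn (pn a) = Dn (pn b) := by exact_mod_cast hd
          rw [ih (pn a) (pn b) (by have := pn_lt ha1; have := pn_lt hb1; omega)]
          rw [← Lref_step_eq hpa hpb hne hdn]
        · rw [if_neg hd]
          have hdn : Dn (pn a) ≠ Dn (pn b) := fun h => hd (by exact_mod_cast h)
          by_cases hlt : ((Dn (pn a) : Int) < (Dn (pn b) : Int))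
          · rw [if_pos hlt]
            have hl : Dn (pn a) < Dn (pn b) := by exact_mod_cast hlt
            rw [ih a (pn b) (by have := pn_lt hb1; omega)]
            rw [← Lref_step_lt hl]
          · rw [if_neg hlt]
            rw [if_pos (by
              have : Dn (pn b) < Dn (pn a) := by
                have h1 : ¬ (Dn (pn a) < Dn (pn b)) := fun h => hlt (by exact_mod_cast h)
                omega
              exact_mod_cast this)]
            have hg : Dn (pn b) < Dn (pn a) := by
              have h1 : ¬ (Dn (pn a) < Dn (pn b)) := fun h => hlt (by exact_mod_cast h)
              omega
            rw [ih (pn a) b (by have := pn_lt ha1; omega)]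
            rw [← Lref_step_gt hg]

-- mixed signs: A returns 0
lemma A_neg_left : ∀ (fuel : Nat) (x : Int) (b : Nat), x < 0 → b + 1 ≤ fuel →
    getLCAFuel fuel x (b : Int) = 0 := by
  intro fuel
  induction fuel with
  | zero => intro x b _ h; omega
  | succ f ih =>
    intro x b hx hfuel
    rw [getLCAFuel]
    have hpa := getParentIndex_neg hx
    rw [getParentIndex_cast b]
    rw [if_neg (by omega)]
    by_cases hz : (getParentIndex x = 0 ∨ ((pn b : Nat) : Int) = 0)
    · rw [if_pos hz]
    · rw [if_neg hz]
      rw [not_or] at hz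
      have hpb : 1 ≤ pn b := by
        rcases Nat.eq_zero_or_pos (pn b) with h | h
        · exact absurd (by exact_mod_cast h) hz.2
        · omega
      have hb1 : 1 ≤ b := by by_contra h; simp [show b = 0 by omega, pn] at hpb
      rw [getDepth_neg hpa, getDepth_cast]
      have hd1 := Dn_pos hpb
      rw [if_neg (by exact_mod_cast (by omega : (0 : Int) ≠ (Dn (pn b) : Int)))]
      rw [if_pos (by exact_mod_cast (by omega : (0 : Int) < (Dn (pn b) : Int)))]
      exact ih x (pn b) hx (by have := pn_lt hb1; omega)

lemma A_neg_right : ∀ (fuel : Nat) (a : Nat) (y : Int), y < 0 → a + 1 ≤ fuel →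
    getLCAFuel fuel (a : Int) y = 0 := by
  intro fuel
  induction fuel with
  | zero => intro a y _ h; omega
  | succ f ih =>
    intro a y hy hfuel
    rw [getLCAFuel]
    have hpb := getParentIndex_neg hy
    rw [getParentIndex_cast a]
    rw [if_neg (by omega)]
    by_cases hz : (((pn a : Nat) : Int) = 0 ∨ getParentIndex y = 0)
    · rw [if_pos hz]
    · rw [if_neg hz]
      rw [not_or] at hz
      have hpa : 1 ≤ pn a := by
        rcases Nat.eq_zero_or_pos (pn a) with h | h
        · exact absurd (by exact_mod_cast h) hz.1
        · omega
      have ha1 : 1 ≤ a := by by_contra h; simp [show a = 0 by omega, pn] at hpa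
      rw [getDepth_neg hpb, getDepth_cast]
      have hd1 := Dn_pos hpa
      rw [if_neg (by exact_mod_cast (by omega : ((Dn (pn a) : Int)) ≠ 0))]
      rw [if_neg (by exact_mod_cast (by omega : ¬ ((Dn (pn a) : Int) < 0)))]
      rw [if_pos (by exact_mod_cast (by omega : (0 : Int) < (Dn (pn a) : Int)))]
      exact ih (pn a) y hy (by have := pn_lt ha1; omega)

-- B's climb computes Lref
lemma climb_eq : ∀ (fuel : Nat) (p q : Nat), p + q + 1 ≤ fuel →
    lcaClimb fuel (p : Int) (q : Int) = (Lref p q : Int) := by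
  intro fuel
  induction fuel with
  | zero => intro p q h; omega
  | succ f ih =>
    intro p q hfuel
    rw [lcaClimb]
    by_cases heq : ((p : Int) = (q : Int))
    · simp only [ne_eq, heq, not_true_eq_false, if_false]
      have : p = q := by exact_mod_cast heq
      rw [this, Lref_self]
    · simp only [ne_eq, heq, not_false_eq_true, if_true]
      have hne : p ≠ q := fun h => heq (by exact_mod_cast h)
      by_cases hgt : ((p : Int) > (q : Int))
      · rw [if_pos hgt]
        have hq : q < p := by exact_mod_cast hgt
        rw [floordiv_pred_cast (by omega), ih (pn p) q (by have := pn_lt (by omega : 1 ≤ p); omega)]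
        have hL : Lref p q = Lref (pn p) q := by rw [Lref, if_neg hne, if_pos hq]
        rw [hL]
      · rw [if_neg hgt]
        have hp : p < q := by
          have : ¬ (q < p) := fun h => hgt (by exact_mod_cast h)
          omega
        rw [floordiv_pred_cast (by omega), ih p (pn q) (by have := pn_lt (by omega : 1 ≤ q); omega)]
        have hL : Lref p q = Lref p (pn q) := by rw [Lref, if_neg hne, if_neg (by omega)]
        rw [hL]

-- initial parent of B's entry
lemma alt_parent_cast (n : Nat) :
    (if (0 : Int) < (n : Int) then PySem.Int.floordiv ((n : Int) - 1) 2 else 0) = (pn n : Int) := by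
  rcases Nat.eq_zero_or_pos n with h | h
  · simp [h, pn]
  · rw [if_pos (by exact_mod_cast h), floordiv_pred_cast h]

-- ===== VERDICT (by name: the statement is the Claim_ definition above) =====
theorem getLeastCommonAncestor_spec : Claim_equal_getLeastCommonAncestor := by
  intro ia ib _ hpre
  unfold Spec_getLeastCommonAncestor getLeastCommonAncestor getLeastCommonAncestor_alt
  by_cases ha : 0 ≤ ia
  · by_cases hb : 0 ≤ ib
    · -- both nonnegative
      obtain ⟨m, hm⟩ : ∃ m : Nat, ia = (m : Int) := ⟨ia.toNat, (Int.toNat_of_nonneg ha).symm⟩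
      obtain ⟨n, hn⟩ : ∃ n : Nat, ib = (n : Int) := ⟨ib.toNat, (Int.toNat_of_nonneg hb).symm⟩
      subst hm; subst hn
      simp only [Int.toNat_natCast, alt_parent_cast]
      rw [A_nonneg (m + n + 1) m n (by omega)]
      rw [climb_eq (m + n + 1) (pn m) (pn n)
        (by have h1 : pn m ≤ m := by simp [pn]; omega
            have h2 : pn n ≤ n := by simp [pn]; omega
            omega)]
    · -- ib < 0 ≤ ia
      obtain ⟨m, hm⟩ : ∃ m : Nat, ia = (m : Int) := ⟨ia.toNat, (Int.toNat_of_nonneg ha).symm⟩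
      subst hm
      simp only [Int.toNat_natCast]
      rw [show ib.toNat = 0 by omega]
      rw [A_neg_right (m + 0 + 1) m ib (by omega) (by simp)]
      rw [if_neg (show ¬ (0 : Int) < ib by omega), alt_parent_cast m]
      have hc := climb_eq (m + 0 + 1) (pn m) 0 (by have : pn m ≤ m := by simp [pn]; omega
                                                   omega)
      rw [Lref_zero_right] at hc
      symm; simpa using hc
  · -- ia < 0, so 0 ≤ ib by Pre_
    have ha' : ia < 0 := by omega
    have hb : 0 ≤ ib := by rcases hpre with h | h; omega; exact h
    obtain ⟨n, hn⟩ : ∃ n : Nat, ib = (n : Int) := ⟨ib.toNat, (Int.toNat_of_nonneg hb).symm⟩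
    subst hn
    simp only [Int.toNat_natCast]
    rw [show ia.toNat = 0 by omega]
    rw [A_neg_left (0 + n + 1) ia n (by omega) (by omega)]
    rw [if_neg (show ¬ (0 : Int) < ia by omega), alt_parent_cast n]
    have hc := climb_eq (0 + n + 1) 0 (pn n) (by have : pn n ≤ n := by simp [pn]; omega
                                                 omega)
    rw [Lref_zero_left] at hc
    symm; simpa using hc
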